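-- pv_equiv track=rewrite | github.com/whelixw/vgOrient | kmer_rotation_multiprocessing.py | find_longest_contiguous_ones
-- ===== SOURCE A (Python) =====
-- def find_longest_contiguous_ones(mask):
--     longest_run = 0
--     current_run = 0
--     start_index = 0
--     for i, val in enumerate(mask):
--         if val == 1:
--             current_run += 1
--             if current_run > longest_run:
--                 longest_run = current_run
--                 start_index = i - longest_run + 1
--         else:
--             current_run = 0
--     return start_index, longest_run
-- ===== SOURCE B (Python) =====
-- def find_longest_contiguous_ones(mask):
--     # Build the list of (start, length) runs of ones first, then pick the
--     # first run with the greatest length (default (0, 0)).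
--     runs = []
--     i = 0
--     n = len(mask)
--     while i < n:
--         if mask[i] == 1:
--             j = i
--             while j < n and mask[j] == 1:
--                 j += 1
--             runs.append((i, j - i))
--             i = j
--         else:
--             i += 1
--     best = (0, 0)
--     for r in runs:
--         if r[1] > best[1]:
--             best = r
--     return best
-- ===== Notes on version B (the rewrite author's own statement) =====
-- stated objective: alternative
-- what changed: Instead of one pass keeping longest/current/start counters with an index formula, B first materialises the list of (start,length) runs of ones and then selects the first run of maximal length (default (0,0)).
import Mathlib
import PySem

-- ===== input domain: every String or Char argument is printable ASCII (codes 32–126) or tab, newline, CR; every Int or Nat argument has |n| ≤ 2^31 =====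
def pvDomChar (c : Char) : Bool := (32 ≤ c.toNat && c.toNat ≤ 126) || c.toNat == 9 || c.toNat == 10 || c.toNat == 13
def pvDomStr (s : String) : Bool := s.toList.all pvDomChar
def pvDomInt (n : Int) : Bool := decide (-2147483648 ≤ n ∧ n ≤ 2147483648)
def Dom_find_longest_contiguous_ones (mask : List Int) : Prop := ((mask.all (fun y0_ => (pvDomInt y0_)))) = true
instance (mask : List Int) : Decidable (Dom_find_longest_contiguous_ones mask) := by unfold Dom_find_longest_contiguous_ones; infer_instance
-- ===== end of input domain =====

-- B builds the list of (start,length) runs of ones first, then selects the first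
-- run of maximal length; A keeps longest/current/start counters in one pass.

-- ===== PORT A =====
-- the for-loop of A as structural recursion over the list, carrying the index
-- i and the three loop variables longest_run, current_run, start_index
def goA_find (l : List Int) (i longest current start : Int) : Int × Int :=
  match l with
  | [] => (start, longest)
  | v :: t =>
    if v == 1 then
      if current + 1 > longest then
        goA_find t (i + 1) (current + 1) (current + 1) (i - (current + 1) + 1)
      else
        goA_find t (i + 1) longest (current + 1) start
    else
      goA_find t (i + 1) longest 0 start

def find_longest_contiguous_ones (mask : List Int) : Int × Int :=
  goA_find mask 0 0 0 0

-- ===== PORT B =====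
-- the outer while-loop of B: at a 1 it scans the run (inner while = takeWhile
-- over the tail) and records (pos, run length); otherwise it advances by one
def runsOf (l : List Int) (pos : Int) : List (Int × Int) :=
  match l with
  | [] => []
  | x :: t =>
    if x == 1 then
      let g := t.takeWhile (fun v => v == 1)
      (pos, 1 + (g.length : Int)) ::
        runsOf (t.dropWhile (fun v => v == 1)) (pos + 1 + (g.length : Int))
    else
      runsOf t (pos + 1)
termination_by l.length
decreasing_by
  · simpa using Nat.lt_succ_of_le (List.length_dropWhile_le _ _)
  · simp

def find_longest_contiguous_ones_alt (mask : List Int) : Int × Int :=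
  (runsOf mask 0).foldl (fun b r => if r.2 > b.2 then r else b) (0, 0)

-- ===== PRECONDITION & SPEC =====
def Spec_find_longest_contiguous_ones (mask : List Int) (out : Int × Int) : Prop := out = find_longest_contiguous_ones_alt mask
instance (mask : List Int) (out : Int × Int) : Decidable (Spec_find_longest_contiguous_ones mask out) := by unfold Spec_find_longest_contiguous_ones; infer_instance

-- ===== CLAIM (what is proved, stated in full; the proofs are below) =====
def Claim_equal_find_longest_contiguous_ones : Prop := ∀ (mask : List Int), Dom_find_longest_contiguous_ones mask → Spec_find_longest_contiguous_ones mask (find_longest_contiguous_ones mask)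

-- ===== LEMMAS AND PROOFS =====

lemma goA_congr (rest : List Int) (a b c d a' b' c' d' : Int)
    (h1 : a = a') (h2 : b = b') (h3 : c = c') (h4 : d = d') :
    goA_find rest a b c d = goA_find rest a' b' c' d' := by
  subst h1; subst h2; subst h3; subst h4; rfl

-- A's loop over a block of k ones: current grows by k, and the best pair is
-- replaced by (run start, current + k) exactly when that beats longest.
lemma goA_ones (k : Nat) : ∀ (rest : List Int) (i longest current start : Int),
    current ≤ longest →
    goA_find (List.replicate k 1 ++ rest) i longest current start =
      goA_find rest (i + k)
        (if longest < current + k then current + k else longest)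
        (current + k)
        (if longest < current + k then i - current else start) := by
  induction k with
  | zero =>
    intro rest i longest current start h
    simp [Int.not_lt.mpr h]
  | succ k ih =>
    intro rest i longest current start h
    rw [List.replicate_succ, List.cons_append]
    by_cases hc : current + 1 > longest
    · rw [show goA_find (1 :: (List.replicate k 1 ++ rest)) i longest current start
          = goA_find (List.replicate k 1 ++ rest) (i + 1) (current + 1) (current + 1)
              (i - (current + 1) + 1) from by simp [goA_find, hc]]
      rw [ih _ _ _ _ _ le_rfl]
      apply goA_congr <;> (push_cast; omega)
    · rw [show goA_find (1 :: (List.replicate k 1 ++ rest)) i longest current start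
          = goA_find (List.replicate k 1 ++ rest) (i + 1) longest (current + 1) start from by
            simp [goA_find, hc]]
      rw [ih _ _ _ _ _ (by omega)]
      apply goA_congr <;> (push_cast; omega)

lemma goA_zero (l : List Int) (z i L c s : Int) (hz : ¬ (z = 1)) :
    goA_find (z :: l) i L c s = goA_find l (i + 1) L 0 s := by
  simp [goA_find, hz]

lemma runsOf_zero (l : List Int) (z p : Int) (hz : ¬ (z = 1)) :
    runsOf (z :: l) p = runsOf l (p + 1) := by
  simp [runsOf, hz]

lemma takeWhile_ones_replicate (t : List Int) :
    t.takeWhile (fun v => v == 1)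
      = List.replicate (t.takeWhile (fun v => v == 1)).length 1 := by
  rw [List.eq_replicate_iff]
  refine ⟨rfl, fun b hb => ?_⟩
  have := List.mem_takeWhile_imp hb
  simpa using this

lemma main_run (n : Nat) : ∀ (mask : List Int), mask.length ≤ n →
    ∀ (i longest start : Int), 0 ≤ longest →
    goA_find mask i longest 0 start =
      (runsOf mask i).foldl (fun b r => if r.2 > b.2 then r else b) (start, longest) := by
  induction n with
  | zero =>
    intro mask hlen i longest start _
    have : mask = [] := List.eq_nil_of_length_eq_zero (Nat.le_zero.mp hlen)
    subst this; simp [goA_find, runsOf]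
  | succ n ih =>
    intro mask hlen i longest start hL
    match mask with
    | [] => simp [goA_find, runsOf]
    | x :: t =>
      by_cases hx : x = 1
      · subst hx
        set k := (t.takeWhile (fun v => v == 1)).length with hk
        have hdecomp : (1 : Int) :: t
            = List.replicate (k + 1) 1 ++ t.dropWhile (fun v => v == 1) := by
          conv_lhs => rw [← List.takeWhile_append_dropWhile (p := fun v => v == 1) (l := t)]
          rw [takeWhile_ones_replicate t, ← hk, List.replicate_succ]
          simp
        have hruns : runsOf ((1 : Int) :: t) i
            = (i, 1 + (k : Int)) ::
                runsOf (t.dropWhile (fun v => v == 1)) (i + 1 + (k : Int)) := by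
          simp [runsOf, hk]
        rw [hruns, List.foldl_cons]
        conv_lhs => rw [hdecomp]
        rw [goA_ones (k + 1) _ _ _ _ _ hL]
        have hstep : (if ((i, 1 + (k : Int)) : Int × Int).2 > ((start, longest) : Int × Int).2
              then ((i, 1 + (k : Int)) : Int × Int) else (start, longest))
            = ((if longest < 0 + (((k + 1 : Nat)) : Int) then i - 0 else start),
               (if longest < 0 + (((k + 1 : Nat)) : Int) then 0 + (((k + 1 : Nat)) : Int) else longest)) := by
          have hiff : (longest < 0 + (((k + 1 : Nat)) : Int)) ↔ ((1 + (k : Int)) > longest) := by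
            push_cast; omega
          by_cases hb : (1 + (k : Int)) > longest
          · simp only [if_pos hb, if_pos (hiff.mpr hb), Prod.mk.injEq]
            constructor <;> (push_cast; omega)
          · simp only [if_neg hb, if_neg (fun h => hb (hiff.mp h))]
        rw [hstep]
        rcases hdw : t.dropWhile (fun v => v == 1) with _ | ⟨z, t'⟩
        · simp [goA_find, runsOf]
        · have hz : ¬ (z = 1) := by
            have := List.head?_dropWhile_not (fun v => (v == 1)) t
            rw [hdw] at this; simpa using this
          rw [goA_zero _ _ _ _ _ _ hz, runsOf_zero _ _ _ hz]
          have hlen' : t'.length ≤ n := by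
            have h2 : (z :: t').length ≤ t.length := by
              rw [← hdw]; exact List.length_dropWhile_le _ _
            have h3 : t.length ≤ n := by simpa using hlen
            simp at h2; omega
          rw [ih t' hlen' _ _ _ (by split_ifs <;> omega)]
          congr 2
          push_cast; ring
      · rw [goA_zero _ _ _ _ _ _ hx, runsOf_zero _ _ _ hx]
        exact ih t (by simpa using hlen) _ _ _ hL

-- ===== VERDICT (by name: the statement is the Claim_ definition above) =====
theorem find_longest_contiguous_ones_spec : Claim_equal_find_longest_contiguous_ones := by
  intro mask _
  unfold Spec_find_longest_contiguous_ones find_longest_contiguous_ones find_longest_contiguous_ones_alt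
  exact main_run mask.length mask le_rfl 0 0 0 le_rfl
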